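-- pv_equiv track=rewrite | github.com/JaneChun/algorithm | 프로그래머스/3/60059. 자물쇠와 열쇠/자물쇠와 열쇠.py | check
-- ===== SOURCE A (Python) =====
-- def check(lock, key, x_offset, y_offset):
--     N = len(lock)
--     M = len(key)
--
--     for i in range(N):
--         for j in range(N):
--             val = lock[i][j] # 현재 자물쇠의 값
--
--             key_i = i - x_offset
--             key_j = j - y_offset
--
--             if 0 <= key_i < M and 0 <= key_j < M:
--                 val += key[key_i][key_j] # val(0) + key(1) = 1
--
--             # 1이 아닌 경우, 열수 없음(0이거나 2인 경우)
--             if val != 1: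
--                 return False
--     # 모두 통과한 경우 True
--     return True
-- ===== SOURCE B (Python) =====
-- def check(lock, key, x_offset, y_offset):
--     N = len(lock)
--     M = len(key)
--     # Pass 1: overlap region, traversed via key coordinates.
--     for ki in range(M):
--         li = ki + x_offset
--         if 0 <= li < N:
--             for kj in range(M):
--                 lj = kj + y_offset
--                 if 0 <= lj < N:
--                     if lock[li][lj] + key[ki][kj] != 1:
--                         return False
--     # Pass 2: lock cells not covered by the key.
--     for i in range(N):
--         for j in range(N):
--             if not (0 <= i - x_offset < M and 0 <= j - y_offset < M):
--                 if lock[i][j] != 1: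
--                     return False
--     return True
-- ===== Notes on version B (the rewrite author's own statement) =====
-- stated objective: alternative
-- what changed: Single merged lock scan replaced by two passes: the overlap is traversed via key coordinates (ki,kj) checking lock[ki+x][kj+y]+key[ki][kj]==1, then a second scan checks the uncovered lock cells equal 1.
-- outside the precondition, e.g. on check([[9, 0], [0, 0]], [[1], []], 0, 1): A returns False, B raises IndexError
import Mathlib
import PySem

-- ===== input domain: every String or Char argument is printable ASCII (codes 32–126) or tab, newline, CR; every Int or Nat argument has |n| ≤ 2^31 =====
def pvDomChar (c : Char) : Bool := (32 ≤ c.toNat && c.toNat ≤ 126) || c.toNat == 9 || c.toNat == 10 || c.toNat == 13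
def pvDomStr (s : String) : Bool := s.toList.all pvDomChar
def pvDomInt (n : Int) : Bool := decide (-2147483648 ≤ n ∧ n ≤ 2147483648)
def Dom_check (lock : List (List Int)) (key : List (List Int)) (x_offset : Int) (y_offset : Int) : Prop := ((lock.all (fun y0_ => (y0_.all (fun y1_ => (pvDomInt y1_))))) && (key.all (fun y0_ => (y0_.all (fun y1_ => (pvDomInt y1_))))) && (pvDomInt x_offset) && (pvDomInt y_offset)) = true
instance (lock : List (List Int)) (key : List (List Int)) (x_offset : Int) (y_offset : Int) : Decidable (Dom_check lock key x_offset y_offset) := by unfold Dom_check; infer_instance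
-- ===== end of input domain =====

-- B replaces A's single merged scan of the lock by two passes (overlap traversed via key
-- coordinates, then the uncovered lock cells); same cost, different decomposition (objective: alternative).

-- ===== PORT A =====
def check (lock : List (List Int)) (key : List (List Int)) (x_offset : Int) (y_offset : Int) : Bool :=
  let N : Int := lock.length
  let M : Int := key.length
  (PySem.List.pyRange 0 N 1).all (fun i =>
    (PySem.List.pyRange 0 N 1).all (fun j =>
      let val := PySem.List.pyGetD (PySem.List.pyGetD lock i []) j 0
      let key_i := i - x_offset
      let key_j := j - y_offset
      let val := if 0 ≤ key_i ∧ key_i < M ∧ 0 ≤ key_j ∧ key_j < M then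
                   val + PySem.List.pyGetD (PySem.List.pyGetD key key_i []) key_j 0
                 else val
      val == 1))

-- ===== PORT B =====
def check_alt (lock : List (List Int)) (key : List (List Int)) (x_offset : Int) (y_offset : Int) : Bool :=
  let N : Int := lock.length
  let M : Int := key.length
  ((PySem.List.pyRange 0 M 1).all (fun ki =>
      let li := ki + x_offset
      if 0 ≤ li ∧ li < N then
        (PySem.List.pyRange 0 M 1).all (fun kj =>
          let lj := kj + y_offset
          if 0 ≤ lj ∧ lj < N then
            (PySem.List.pyGetD (PySem.List.pyGetD lock li []) lj 0 +
             PySem.List.pyGetD (PySem.List.pyGetD key ki []) kj 0) == 1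
          else true)
      else true))
  &&
  ((PySem.List.pyRange 0 N 1).all (fun i =>
    (PySem.List.pyRange 0 N 1).all (fun j =>
      if ¬ (0 ≤ i - x_offset ∧ i - x_offset < M ∧ 0 ≤ j - y_offset ∧ j - y_offset < M) then
        PySem.List.pyGetD (PySem.List.pyGetD lock i []) j 0 == 1
      else true)))

-- ===== PRECONDITION & SPEC =====
-- helpers for Pre_: row/cell access with a 0/[] default, never reaching out of range
def pvRow (m : List (List Int)) (i : Int) : List Int := if 0 ≤ i then m.getD i.toNat [] else []
def pvRowLen (m : List (List Int)) (i : Int) : Int := (pvRow m i).length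
def pvGet2 (m : List (List Int)) (i j : Int) : Int := if 0 ≤ j then (pvRow m i).getD j.toNat 0 else 0
def pvLexLT (a b c d : Int) : Bool := a < c || (a == c && b < d)
-- A raises no IndexError: every cell of A's row-major scan is either in range or preceded
-- (in that scan order) by an in-range cell whose value already decides False
def pvNoRaiseA (lock : List (List Int)) (key : List (List Int)) (x : Int) (y : Int) : Bool :=
  let N : Int := lock.length
  let M : Int := key.length
  let cov : Int → Int → Bool := fun i j =>
    decide (0 ≤ i - x) && decide (i - x < M) && decide (0 ≤ j - y) && decide (j - y < M)
  let readA : Int → Int → Bool := fun i j =>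
    decide (j < pvRowLen lock i) && (!(cov i j) || decide (j - y < pvRowLen key (i - x)))
  let stopA : Int → Int → Bool := fun i j =>
    readA i j && decide (pvGet2 lock i j + (if cov i j then pvGet2 key (i - x) (j - y) else 0) ≠ 1)
  (PySem.List.pyRange 0 N 1).all fun i => (PySem.List.pyRange 0 N 1).all fun j =>
    readA i j || ((PySem.List.pyRange 0 N 1).any fun i2 => (PySem.List.pyRange 0 N 1).any fun j2 =>
      pvLexLT i2 j2 i j && stopA i2 j2)
-- B raises no IndexError: same condition for B's scan (overlap pass in key order, then the uncovered lock cells)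
def pvNoRaiseB (lock : List (List Int)) (key : List (List Int)) (x : Int) (y : Int) : Bool :=
  let N : Int := lock.length
  let M : Int := key.length
  let cov : Int → Int → Bool := fun i j =>
    decide (0 ≤ i - x) && decide (i - x < M) && decide (0 ≤ j - y) && decide (j - y < M)
  let inP1 : Int → Int → Bool := fun ki kj =>
    decide (0 ≤ ki + x) && decide (ki + x < N) && decide (0 ≤ kj + y) && decide (kj + y < N)
  let readB1 : Int → Int → Bool := fun ki kj =>
    decide (kj + y < pvRowLen lock (ki + x)) && decide (kj < pvRowLen key ki)
  let stopB1 : Int → Int → Bool := fun ki kj =>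
    readB1 ki kj && decide (pvGet2 lock (ki + x) (kj + y) + pvGet2 key ki kj ≠ 1)
  let readB2 : Int → Int → Bool := fun i j => decide (j < pvRowLen lock i)
  let stopB2 : Int → Int → Bool := fun i j => readB2 i j && decide (pvGet2 lock i j ≠ 1)
  let anyStop1 : Bool := (PySem.List.pyRange 0 M 1).any fun ki => (PySem.List.pyRange 0 M 1).any fun kj =>
    inP1 ki kj && stopB1 ki kj
  (((PySem.List.pyRange 0 M 1).all fun ki => (PySem.List.pyRange 0 M 1).all fun kj =>
      !(inP1 ki kj) || readB1 ki kj ||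
        ((PySem.List.pyRange 0 M 1).any fun a => (PySem.List.pyRange 0 M 1).any fun b =>
          pvLexLT a b ki kj && inP1 a b && stopB1 a b))
   &&
   ((PySem.List.pyRange 0 N 1).all fun i => (PySem.List.pyRange 0 N 1).all fun j =>
      cov i j || readB2 i j || anyStop1 ||
        ((PySem.List.pyRange 0 N 1).any fun a => (PySem.List.pyRange 0 N 1).any fun b =>
          pvLexLT a b i j && !(cov a b) && stopB2 a b)))
-- Pre_ admits exactly the inputs on which neither Python program raises an IndexError: every
-- out-of-range access is preceded, in the respective program's own scan order, by an in-range
-- cell that already decides False.  It excludes inputs on which A returns but B's different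
-- traversal order reaches the out-of-range access first and raises (see the cited example).
def Pre_check (lock : List (List Int)) (key : List (List Int)) (x_offset : Int) (y_offset : Int) : Prop :=
  (pvNoRaiseA lock key x_offset y_offset && pvNoRaiseB lock key x_offset y_offset) = true
instance (lock : List (List Int)) (key : List (List Int)) (x_offset : Int) (y_offset : Int) : Decidable (Pre_check lock key x_offset y_offset) := by unfold Pre_check; infer_instance
def pvWitness_check : List (List Int) × List (List Int) × Int × Int := ([[0, 0], [0, 1]], [[1]], 1, 0)
def Spec_check (lock : List (List Int)) (key : List (List Int)) (x_offset : Int) (y_offset : Int) (out : Bool) : Prop := out = check_alt lock key x_offset y_offset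
instance (lock : List (List Int)) (key : List (List Int)) (x_offset : Int) (y_offset : Int) (out : Bool) : Decidable (Spec_check lock key x_offset y_offset out) := by unfold Spec_check; infer_instance

-- ===== CLAIM (what is proved, stated in full; the proofs are below) =====
def Claim_equal_check : Prop := ∀ (lock : List (List Int)) (key : List (List Int)) (x_offset : Int) (y_offset : Int), Dom_check lock key x_offset y_offset → Pre_check lock key x_offset y_offset → Spec_check lock key x_offset y_offset (check lock key x_offset y_offset)

-- ===== LEMMAS AND PROOFS =====

-- ===== VERDICT (by name: the statement is the Claim_ definition above) =====
theorem check_spec : Claim_equal_check := by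
  intro lock key x y _ _
  unfold Spec_check check check_alt
  rw [Bool.eq_iff_iff]
  simp only [List.all_eq_true, PySem.List.mem_pyRange_one, beq_iff_eq, Bool.and_eq_true]
  constructor
  · intro hA
    refine ⟨?_, ?_⟩
    · intro ki hki
      split_ifs with h1
      · rw [List.all_eq_true]
        intro kj hkj
        rw [PySem.List.mem_pyRange_one] at hkj
        split_ifs with h2
        · have hcov : 0 ≤ ki + x - x ∧ ki + x - x < (key.length : Int) ∧
              0 ≤ kj + y - y ∧ kj + y - y < (key.length : Int) :=
            ⟨by omega, by omega, by omega, by omega⟩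
          have h3 := hA (ki + x) ⟨by omega, by omega⟩ (kj + y) ⟨by omega, by omega⟩
          rw [if_pos hcov] at h3
          have e1 : ki + x - x = ki := by ring
          have e2 : kj + y - y = kj := by ring
          rw [e1, e2] at h3
          simpa [beq_iff_eq] using h3
        · rfl
      · rfl
    · intro i hi j hj
      split_ifs with h
      · rfl
      · have h3 := hA i hi j hj
        rw [if_neg h] at h3
        simpa [beq_iff_eq] using h3
  · rintro ⟨hB1, hB2⟩ i hi j hj
    by_cases hc : 0 ≤ i - x ∧ i - x < (key.length : Int) ∧ 0 ≤ j - y ∧ j - y < (key.length : Int)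
    · rw [if_pos hc]
      obtain ⟨c1, c2, c3, c4⟩ := hc
      have h1 := hB1 (i - x) ⟨by omega, by omega⟩
      rw [if_pos (⟨by omega, by omega⟩ : 0 ≤ i - x + x ∧ i - x + x < (lock.length : Int))] at h1
      rw [List.all_eq_true] at h1
      have h2 := h1 (j - y) (by rw [PySem.List.mem_pyRange_one]; exact ⟨by omega, by omega⟩)
      rw [if_pos (⟨by omega, by omega⟩ : 0 ≤ j - y + y ∧ j - y + y < (lock.length : Int))] at h2
      have e1 : i - x + x = i := by ring
      have e2 : j - y + y = j := by ring
      rw [e1, e2] at h2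
      simpa [beq_iff_eq] using h2
    · rw [if_neg hc]
      have h3 := hB2 i hi j hj
      rw [if_pos hc] at h3
      simpa [beq_iff_eq] using h3
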